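-- pv_equiv track=rewrite | github.com/gazek/color-changer | rgb.py | _get_color_dominance_indices
-- ===== SOURCE A (Python) =====
-- from collections import defaultdict
--
-- def _get_color_dominance_indices(color):
--     """Orders the color component indices in descending order by underlying component color value
--
--     Positional Arguments:
--     color -- an RBG tuple of ints in any order
--
--     Returns:
--     (int, int, int)
--     """
--     # create a dict where the
--     # key is the component color value and the
--     # value is a list of indices that hav the component color value
--     value_map = defaultdict(list)
--     # populate the dictionary
--     for c in range(len(color)):
--         value_map[color[c]].append(c)
--     # sort the dictionary keys (color component values) in descending order
--     ordered = sorted(value_map.keys(), reverse=True)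
--     # create a list to hold the color component indices
--     # in descending order by color component value
--     # if the underlying component color valuea are equal
--     # then the indices will be ordered in ascending order by index value
--     result = []
--     for k in ordered:
--         result = result + value_map[k]
--     # convert to a tuple before returning
--     return tuple(result)
-- ===== SOURCE B (Python) =====
-- def _get_color_dominance_indices(color):
--     """Orders the color component indices in descending order by underlying component color value."""
--     return tuple(sorted(range(len(color)), key=lambda i: color[i], reverse=True))
-- ===== Notes on version B (the rewrite author's own statement) =====
-- stated objective: simpler
-- what changed: Replaces A's group-by-value dict, descending key sort and quadratic 'result = result + group' concatenation with a single stable key-sort of the index range (reverse=True), whose tie stability reproduces A's ascending-index order for equal values.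
import Mathlib
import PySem

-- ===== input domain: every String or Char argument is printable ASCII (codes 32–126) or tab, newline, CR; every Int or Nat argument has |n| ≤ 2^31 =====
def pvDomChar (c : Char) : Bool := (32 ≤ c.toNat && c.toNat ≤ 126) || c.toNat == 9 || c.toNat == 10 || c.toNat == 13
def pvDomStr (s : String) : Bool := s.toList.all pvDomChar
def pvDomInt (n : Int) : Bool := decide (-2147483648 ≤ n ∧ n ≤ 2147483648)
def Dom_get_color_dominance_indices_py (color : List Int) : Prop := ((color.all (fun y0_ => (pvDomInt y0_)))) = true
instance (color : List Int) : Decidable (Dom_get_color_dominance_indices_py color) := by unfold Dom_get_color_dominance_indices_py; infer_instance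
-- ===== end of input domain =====

-- B replaces A's group-by-value dict plus descending key sort and concatenation with a single
-- stable reverse key-sort of the index range (objective: simpler; same return value everywhere).

-- ===== PORT A =====
-- A: build a dict value -> list of indices, sort its keys descending, concatenate the groups.
def get_color_dominance_indices_py (color : List Int) : List Int :=
  let value_map :=
    (PySem.List.pyRange 0 (PySem.List.len color) 1).foldl
      (fun d c => d.modify (PySem.List.pyGetD color c 0) [] (fun v => v ++ [c]))
      PySem.Dict.empty
  let ordered := PySem.List.sorted value_map.keys (fun k => k) true
  let result := ordered.foldl (fun acc k => acc ++ value_map.getD k []) []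
  result

-- ===== PORT B =====
-- B: one stable sort of the index range by component value, descending.
def get_color_dominance_indices_py_alt (color : List Int) : List Int :=
  PySem.List.sorted (PySem.List.pyRange 0 (PySem.List.len color) 1)
    (fun i => PySem.List.pyGetD color i 0) true

-- ===== PRECONDITION & SPEC =====
def Spec_get_color_dominance_indices_py (color : List Int) (out : List Int) : Prop := out = get_color_dominance_indices_py_alt color
instance (color : List Int) (out : List Int) : Decidable (Spec_get_color_dominance_indices_py color out) := by unfold Spec_get_color_dominance_indices_py; infer_instance

-- ===== CLAIM (what is proved, stated in full; the proofs are below) =====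
def Claim_equal_get_color_dominance_indices_py : Prop := ∀ (color : List Int), Dom_get_color_dominance_indices_py color → Spec_get_color_dominance_indices_py color (get_color_dominance_indices_py color)

-- ===== LEMMAS AND PROOFS =====

-- The strict order both outputs are listed in: descending component value, ties by ascending index.
def pvR (color : List Int) (a b : Int) : Prop :=
  PySem.List.pyGetD color b 0 < PySem.List.pyGetD color a 0 ∨
    (PySem.List.pyGetD color a 0 = PySem.List.pyGetD color b 0 ∧ a < b)

theorem pvR_trans (color : List Int) {a b c : Int} (hab : pvR color a b) (hbc : pvR color b c) :
    pvR color a c := by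
  rcases hab with h | ⟨h1, h2⟩ <;> rcases hbc with h' | ⟨h1', h2'⟩ <;> unfold pvR <;> omega

theorem pvR_asymm (color : List Int) {a b : Int} (hab : pvR color a b) (hba : pvR color b a) :
    False := by
  rcases hab with h | ⟨h1, h2⟩ <;> rcases hba with h' | ⟨h1', h2'⟩ <;> omega

-- Inserting x into an R-chain keeps it a chain when x relates correctly to every element.
theorem pairwise_insertBy {α : Type} (R : α → α → Prop)
    (ht : ∀ {a b c : α}, R a b → R b c → R a c) (bef : α → α → Bool) (x : α) :
    ∀ (ys : List α), ys.Pairwise R →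
      (∀ b ∈ ys, (bef x b = true → R x b) ∧ (bef x b = false → R b x)) →
      (PySem.List.insertBy bef x ys).Pairwise R := by
  intro ys
  induction ys with
  | nil => intro _ _; simp [PySem.List.insertBy]
  | cons y ys ih =>
    intro hp hcond
    rw [List.pairwise_cons] at hp
    obtain ⟨hy, hys⟩ := hp
    by_cases hb : bef x y = true
    · simp only [PySem.List.insertBy, hb, if_true]
      refine List.Pairwise.cons ?_ (List.Pairwise.cons hy hys)
      intro b hbmem
      rcases List.mem_cons.mp hbmem with hbeq | hbmem'
      · exact hbeq ▸ (hcond y List.mem_cons_self).1 hb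
      · exact ht ((hcond y List.mem_cons_self).1 hb) (hy b hbmem')
    · simp only [PySem.List.insertBy, hb]
      refine List.Pairwise.cons ?_ (ih hys (fun b hb' => hcond b (List.mem_cons_of_mem _ hb')))
      intro b hbmem
      rcases (PySem.List.mem_insertBy bef x b ys).mp hbmem with hbeq | hbmem'
      · exact hbeq ▸ (hcond y List.mem_cons_self).2 (eq_false_of_ne_true hb)
      · exact hy b hbmem'

-- Stability of the reverse insertion sort: fed strictly increasing elements, the accumulated
-- chain is strictly ordered by (descending key, ascending element).
theorem stable_foldl (color : List Int) :
    ∀ (xs acc : List Int), acc.Pairwise (pvR color) →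
      (∀ b ∈ acc, ∀ x ∈ xs, b < x) → xs.Pairwise (· < ·) →
      (xs.foldl (fun acc x => PySem.List.insertBy
          (fun a b => decide (PySem.List.pyGetD color b 0 < PySem.List.pyGetD color a 0)) x acc)
        acc).Pairwise (pvR color) := by
  intro xs
  induction xs with
  | nil => intro acc hacc _ _; simpa using hacc
  | cons x xs ih =>
    intro acc hacc hlt hxs
    rw [List.pairwise_cons] at hxs
    obtain ⟨hxhd, hxtl⟩ := hxs
    simp only [List.foldl_cons]
    apply ih
    · apply pairwise_insertBy (pvR color) (pvR_trans color) _ x acc hacc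
      intro b hb
      refine ⟨fun htrue => Or.inl (of_decide_eq_true htrue), fun hfalse => ?_⟩
      have h1 : ¬ PySem.List.pyGetD color b 0 < PySem.List.pyGetD color x 0 :=
        of_decide_eq_false hfalse
      have h2 : b < x := hlt b hb x List.mem_cons_self
      unfold pvR; omega
    · intro b hb x' hx'
      rcases (PySem.List.mem_insertBy _ x b acc).mp hb with hbeq | hb'
      · exact hbeq ▸ hxhd x' hx'
      · exact hlt b hb' x' (List.mem_cons_of_mem _ hx')
    · exact hxtl

-- The pair list A's dict loop effectively traverses: (component value, index) in index order.
def pvPairs (color : List Int) : List (Int × Int) :=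
  (PySem.List.pyRange 0 (PySem.List.len color) 1).map
    (fun c => (PySem.List.pyGetD color c 0, c))

-- The group of indices A stores under value v.
def pvGrp (l : List (Int × Int)) (v : Int) : List Int :=
  (l.filter (fun p => p.1 == v)).map (fun p => p.2)

theorem pvPairs_map_snd (color : List Int) :
    (pvPairs color).map (fun p => p.2) = PySem.List.pyRange 0 (PySem.List.len color) 1 := by
  unfold pvPairs
  rw [List.map_map]
  simp [Function.comp_def]

-- Concatenating the groups of all distinct keys is a permutation of all the indices.
theorem flatMap_groups_perm :
    ∀ (ks : List Int) (l : List (Int × Int)), ks.Nodup → (∀ p ∈ l, p.1 ∈ ks) →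
      (ks.flatMap (fun v => pvGrp l v)).Perm (l.map (fun p => p.2)) := by
  intro ks
  induction ks with
  | nil =>
    intro l _ hmem
    have : l = [] := List.eq_nil_iff_forall_not_mem.mpr (fun p hp => by simpa using hmem p hp)
    simp [this]
  | cons v ks ih =>
    intro l hnd hmem
    rw [List.nodup_cons] at hnd
    obtain ⟨hvks, hndks⟩ := hnd
    have hstep : ∀ w ∈ ks, pvGrp l w = pvGrp (l.filter (fun p => !(p.1 == v))) w := by
      intro w hw
      have hwv : w ≠ v := fun h => hvks (h ▸ hw)
      unfold pvGrp
      rw [List.filter_filter]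
      congr 1
      apply List.filter_congr
      intro p _
      by_cases h : p.1 = w <;> simp [h, hwv]
    have hih := ih (l.filter (fun p => !(p.1 == v))) hndks (by
      intro p hp
      have hpl := List.mem_of_mem_filter hp
      have hpv : ¬ p.1 = v := by simpa using List.of_mem_filter hp
      rcases List.mem_cons.mp (hmem p hpl) with h | h
      · exact absurd h hpv
      · exact h)
    have e1 : (v :: ks).flatMap (fun w => pvGrp l w)
        = pvGrp l v ++ ks.flatMap (fun w => pvGrp l w) := by simp
    rw [e1, List.flatMap_congr hstep]
    refine (List.Perm.append_left _ hih).trans ?_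
    have e2 : pvGrp l v ++ (l.filter (fun p => !(p.1 == v))).map (fun p => p.2)
        = ((l.filter (fun p => p.1 == v)) ++ (l.filter (fun p => !(p.1 == v)))).map (fun p => p.2) := by
      simp [pvGrp]
    rw [e2]
    exact List.Perm.map _ (List.filter_append_perm _ l)

-- Every index in group v has component value v.
theorem pvGrp_key (color : List Int) (v : Int) :
    ∀ x ∈ pvGrp (pvPairs color) v, PySem.List.pyGetD color x 0 = v := by
  intro x hx
  obtain ⟨p, hp, rfl⟩ := List.mem_map.mp hx
  have hv : p.1 = v := by simpa using List.of_mem_filter hp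
  obtain ⟨c, _, rfl⟩ := List.mem_map.mp (List.mem_of_mem_filter hp)
  simpa using hv

-- Within a group, indices are in ascending order.
theorem pvGrp_pairwise_lt (color : List Int) (v : Int) :
    (pvGrp (pvPairs color) v).Pairwise (· < ·) := by
  have hsub : (pvGrp (pvPairs color) v).Sublist ((pvPairs color).map (fun p => p.2)) :=
    List.Sublist.map _ List.filter_sublist
  have hpw : ((pvPairs color).map (fun p => p.2)).Pairwise (· < ·) := by
    rw [pvPairs_map_snd]
    exact PySem.List.pairwise_lt_pyRange_one 0 (PySem.List.len color)
  exact hpw.sublist hsub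

-- A's result, rewritten as the groups of the sorted distinct values, concatenated.
theorem portA_eq_flatMap (color : List Int) :
    get_color_dominance_indices_py color
      = (PySem.List.sorted (PySem.Set.ofList color) (fun k => k) true).flatMap
          (fun v => pvGrp (pvPairs color) v) := by
  unfold get_color_dominance_indices_py
  simp only
  have hfold : (PySem.List.pyRange 0 (PySem.List.len color) 1).foldl
      (fun d c => d.modify (PySem.List.pyGetD color c 0) [] (fun v => v ++ [c]))
      PySem.Dict.empty
      = (pvPairs color).foldl (fun d p => d.modify p.1 [] (fun v => v ++ [p.2]))
          PySem.Dict.empty := by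
    unfold pvPairs
    rw [List.foldl_map]
  rw [hfold]
  have hkeys : ((pvPairs color).foldl (fun d p => d.modify p.1 [] (fun v => v ++ [p.2]))
      PySem.Dict.empty).keys = PySem.Set.ofList color := by
    rw [PySem.Dict.keys_foldl_modify_key (pvPairs color) (fun p => p.1) []
      (fun _ p => (fun v => v ++ [p.2])) PySem.Dict.empty]
    rw [PySem.Dict.keys_empty, PySem.Set.update_nil_left]
    congr 1
    unfold pvPairs
    rw [List.map_map]
    exact PySem.List.map_pyGetD_pyRange_zero color 0
  rw [hkeys, PySem.List.foldl_append_eq_flatMap, List.nil_append]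
  apply List.flatMap_congr
  intro v _
  rw [PySem.Dict.getD_foldl_modify_append]
  simp [pvGrp]

-- The keys sorted descending, as a chain: strictly decreasing.
theorem ordered_pairwise_gt (color : List Int) :
    (PySem.List.sorted (PySem.Set.ofList color) (fun k => k) true).Pairwise (fun a b => b < a) := by
  have h1 : (PySem.List.sorted (PySem.Set.ofList color) (fun k => k) true).Pairwise
      (fun a b : Int => b ≤ a) :=
    PySem.List.sorted_pairwise_rev (PySem.Set.ofList color) (fun k => k)
  have h2 : (PySem.List.sorted (PySem.Set.ofList color) (fun k => k) true).Nodup :=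
    ((PySem.List.sorted_perm (PySem.Set.ofList color) (fun k => k) true).symm).nodup
      (PySem.Set.nodup_ofList color)
  exact (h1.and h2).imp (fun h => lt_of_le_of_ne h.1 (fun he => h.2 he.symm))

-- A's result is a permutation of the index range.
theorem portA_perm (color : List Int) :
    (get_color_dominance_indices_py color).Perm (PySem.List.pyRange 0 (PySem.List.len color) 1) := by
  rw [portA_eq_flatMap]
  have h1 := flatMap_groups_perm (PySem.List.sorted (PySem.Set.ofList color) (fun k => k) true)
    (pvPairs color)
    (((PySem.List.sorted_perm (PySem.Set.ofList color) (fun k => k) true).symm).nodup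
      (PySem.Set.nodup_ofList color))
    (by
      intro p hp
      rw [PySem.List.mem_sorted, PySem.Set.mem_ofList]
      obtain ⟨c, hc, rfl⟩ := List.mem_map.mp hp
      rw [PySem.List.mem_pyRange_one] at hc
      refine PySem.List.pyGetD_mem color 0 ?_
      unfold PySem.Raise.InRange
      simp only [PySem.List.len] at hc
      omega)
  rw [pvPairs_map_snd] at h1
  exact h1

-- A's result is a pvR-chain.
theorem portA_pairwise (color : List Int) :
    (get_color_dominance_indices_py color).Pairwise (pvR color) := by
  rw [portA_eq_flatMap, List.pairwise_flatMap]
  constructor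
  · intro v _
    refine (pvGrp_pairwise_lt color v).imp_of_mem ?_
    intro a b ha hb hab
    exact Or.inr ⟨(pvGrp_key color v a ha).trans (pvGrp_key color v b hb).symm, hab⟩
  · refine (ordered_pairwise_gt color).imp ?_
    intro v w hvw x hx y hy
    exact Or.inl (by rw [pvGrp_key color v x hx, pvGrp_key color w y hy]; exact hvw)

-- B's result is a pvR-chain (stability of the reverse sort on the increasing index range).
theorem portB_pairwise (color : List Int) :
    (get_color_dominance_indices_py_alt color).Pairwise (pvR color) := by
  unfold get_color_dominance_indices_py_alt
  rw [PySem.List.sorted_rev_eq_foldl_insertBy]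
  exact stable_foldl color _ [] (List.Pairwise.nil) (by simp)
    (PySem.List.pairwise_lt_pyRange_one 0 (PySem.List.len color))

theorem ports_agree (color : List Int) :
    get_color_dominance_indices_py color = get_color_dominance_indices_py_alt color := by
  refine List.Perm.eq_of_pairwise ?_ (portA_pairwise color) (portB_pairwise color) ?_
  · intro a b _ _ hab hba
    exact absurd hba (fun h => pvR_asymm color hab h)
  · exact (portA_perm color).trans
      (PySem.List.sorted_perm (PySem.List.pyRange 0 (PySem.List.len color) 1) _ true).symm

-- ===== VERDICT (by name: the statement is the Claim_ definition above) =====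
theorem get_color_dominance_indices_py_spec : Claim_equal_get_color_dominance_indices_py := by
  intro color _
  unfold Spec_get_color_dominance_indices_py
  exact ports_agree color
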